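-- pv_equiv track=rewrite | github.com/Schminat000/Python | cse131/Lab03.py | getLeapYear
-- ===== SOURCE A (Python) =====
-- def getLeapYear(userYear, userMonth):
--     """Determines if the year and month is in a
--     leap year.
--     Parameters
--         userYear: an integer.
--             This is the user's chosen year.
--         userMonth: an integer.
--             This is the user's chosen month.
--     Return: the last day of the month.
--     """
--
--     day = (userYear - 1) % 400
--
--     day = (day // 100) * 5 + ((day % 100) - (day % 100) // 4)\
--                                     + ((day % 100) // 4) * 2
--
--     day = day % 7
--
--     noLeapYear = [31, 28, 31, 30, 31, 30,
--                 31, 31, 30, 31, 30, 31]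
--
--     leapYear = [31, 29, 31, 30, 31, 30,
--                 31, 31, 30, 31, 30, 31]
--
--     end_day = 0
--
--     # Determines if there is leapYear or
--     # noLeapYear.
--     if userYear % 4 == 0:
--         for i in range(int(userMonth) - 1):
--             end_day += leapYear[i]
--     else:
--         for i in range(int(userMonth) - 1):
--             end_day += noLeapYear[i]
--
--     day += (end_day % 7)
--     day %= 7
--
--     # Returns the day variable.
--     return day
-- ===== SOURCE B (Python) =====
-- # Cumulative month-length table replaces the summing loop; same year-code formula.
-- _CUM = (0, 31, 59, 90, 120, 151, 181, 212, 243, 273, 304, 334, 365)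
--
-- def getLeapYear(userYear, userMonth):
--     y = (userYear - 1) % 400
--     day = (y // 100) * 5 + ((y % 100) - (y % 100) // 4) + ((y % 100) // 4) * 2
--     m = int(userMonth)
--     if m < 1:
--         end_day = 0
--     else:
--         end_day = _CUM[m - 1] + (1 if userYear % 4 == 0 and m > 2 else 0)
--     return (day + end_day % 7) % 7
-- ===== Notes on version B (the rewrite author's own statement) =====
-- stated objective: simpler
-- what changed: Replaces the month-length summing loop (and the two 12-entry month tables) with a single lookup in a 13-entry cumulative-days table plus a +1 leap adjustment for months after February; the year-code formula is kept.
-- outside the precondition, e.g. on getLeapYear(2000, 14): A raises IndexError, B raises IndexError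
import Mathlib
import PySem

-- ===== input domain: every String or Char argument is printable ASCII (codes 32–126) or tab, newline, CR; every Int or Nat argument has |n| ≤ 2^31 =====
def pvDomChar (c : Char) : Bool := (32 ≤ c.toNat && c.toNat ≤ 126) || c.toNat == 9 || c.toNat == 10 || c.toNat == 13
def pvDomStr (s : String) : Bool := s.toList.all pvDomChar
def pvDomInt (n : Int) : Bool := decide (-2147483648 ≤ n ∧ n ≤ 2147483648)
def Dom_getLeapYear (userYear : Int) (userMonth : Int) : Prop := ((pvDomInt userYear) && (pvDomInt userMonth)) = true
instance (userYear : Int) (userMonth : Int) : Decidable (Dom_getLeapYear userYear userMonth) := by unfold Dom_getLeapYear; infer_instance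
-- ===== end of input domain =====

-- B replaces A's month-length summing loop by one cumulative-table lookup plus a leap adjustment (simpler).

-- ===== PORT A =====
-- pyGetD with default 0 is exact here: inside Pre_ every index the loop produces is in range.
def getLeapYear (userYear : Int) (userMonth : Int) : Int :=
  let day := PySem.Int.mod (userYear - 1) 400
  let day := PySem.Int.floordiv day 100 * 5
      + (PySem.Int.mod day 100 - PySem.Int.floordiv (PySem.Int.mod day 100) 4)
      + PySem.Int.floordiv (PySem.Int.mod day 100) 4 * 2
  let day := PySem.Int.mod day 7
  let noLeapYear : List Int := [31, 28, 31, 30, 31, 30, 31, 31, 30, 31, 30, 31]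
  let leapYear : List Int := [31, 29, 31, 30, 31, 30, 31, 31, 30, 31, 30, 31]
  let endDay : Int :=
    if PySem.Int.mod userYear 4 = 0 then
      (PySem.List.pyRange 0 (userMonth - 1) 1).foldl
        (fun acc i => acc + PySem.List.pyGetD leapYear i 0) 0
    else
      (PySem.List.pyRange 0 (userMonth - 1) 1).foldl
        (fun acc i => acc + PySem.List.pyGetD noLeapYear i 0) 0
  let day := day + PySem.Int.mod endDay 7
  PySem.Int.mod day 7

-- ===== PORT B =====
def cumDaysGLY : List Int := [0, 31, 59, 90, 120, 151, 181, 212, 243, 273, 304, 334, 365]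

def getLeapYear_alt (userYear : Int) (userMonth : Int) : Int :=
  let y := PySem.Int.mod (userYear - 1) 400
  let day := PySem.Int.floordiv y 100 * 5
      + (PySem.Int.mod y 100 - PySem.Int.floordiv (PySem.Int.mod y 100) 4)
      + PySem.Int.floordiv (PySem.Int.mod y 100) 4 * 2
  let endDay : Int :=
    if userMonth < 1 then 0
    else PySem.List.pyGetD cumDaysGLY (userMonth - 1) 0
         + (if PySem.Int.mod userYear 4 = 0 ∧ userMonth > 2 then 1 else 0)
  PySem.Int.mod (day + PySem.Int.mod endDay 7) 7

-- ===== PRECONDITION & SPEC =====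
-- Pre_ excludes userMonth ≥ 14, on which A raises IndexError (the loop reads past the 12-entry month tables).
def Pre_getLeapYear (userYear : Int) (userMonth : Int) : Prop := userMonth ≤ 13
instance (userYear : Int) (userMonth : Int) : Decidable (Pre_getLeapYear userYear userMonth) := by unfold Pre_getLeapYear; infer_instance
def pvWitness_getLeapYear : Int × Int := (2024, 3)

def Spec_getLeapYear (userYear : Int) (userMonth : Int) (out : Int) : Prop := out = getLeapYear_alt userYear userMonth
instance (userYear : Int) (userMonth : Int) (out : Int) : Decidable (Spec_getLeapYear userYear userMonth out) := by unfold Spec_getLeapYear; infer_instance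

-- ===== CLAIM (what is proved, stated in full; the proofs are below) =====
def Claim_equal_getLeapYear : Prop := ∀ (userYear : Int) (userMonth : Int), Dom_getLeapYear userYear userMonth → Pre_getLeapYear userYear userMonth → Spec_getLeapYear userYear userMonth (getLeapYear userYear userMonth)

-- ===== LEMMAS AND PROOFS =====
lemma pvMod7 (a b : Int) : PySem.Int.mod (PySem.Int.mod a 7 + b) 7 = PySem.Int.mod (a + b) 7 := by
  rw [PySem.Int.mod_eq_emod_of_pos (by norm_num), PySem.Int.mod_eq_emod_of_pos (by norm_num),
      PySem.Int.mod_eq_emod_of_pos (by norm_num)]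
  exact Int.emod_add_emod a 7 b

-- ===== VERDICT (by name: the statement is the Claim_ definition above) =====
theorem getLeapYear_spec : Claim_equal_getLeapYear := by
  intro y m _ hpre
  unfold Spec_getLeapYear getLeapYear getLeapYear_alt Pre_getLeapYear at *
  by_cases hm : m < 1
  · have hr : PySem.List.pyRange 0 (m - 1) 1 = [] := by
      rw [PySem.List.pyRange_one]
      have h0 : (m - 1 - 0).toNat = 0 := by omega
      rw [h0]
      simp
    simp only [hr, List.foldl_nil, if_pos hm]
    split_ifs <;> exact pvMod7 _ _
  · have h1 : (1:Int) ≤ m := by omega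
    interval_cases m <;>
      simp only [cumDaysGLY] <;>
      split_ifs <;>
      first
        | omega
        | (simp_all; all_goals (congr 2 <;> decide))
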